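-- pv_equiv track=rewrite | github.com/miliar/Code_Jam_Webscraper | solutions_python/solutions_year14_round2_nr1/461.py | identical
-- ===== SOURCE A (Python) =====
-- def identical(strings):
-- 	prev_ordered = ""
-- 	for str in strings:
-- 		olist = []
-- 		ordered = ""
-- 		#print ",", str
-- 		#print "*", ordered, prev_ordered
-- 		for s in list(str):
-- 			if len(olist) != 0 and s == olist[-1]:
-- 				continue
-- 			else:
-- 				olist.append(s)
-- 		ordered = "".join(olist)
-- 		#print ordered
-- 		#print "p", prev_ordered
-- 		if prev_ordered != "" and ordered != prev_ordered: return -1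
-- 		prev_ordered = ordered
--
-- 	#print prev_ordered
--
-- 	#counters = []
-- 	#for str in strings:
-- 	#	counters.append(collections.Counter(str))
-- 	#print prev_ordered
-- 	freqs_r = []
-- 	for str in strings:
-- 		freq = []
-- 		count = 0
-- 		i = 0
-- 		for s in str:
-- 			if i < len(prev_ordered) and s == prev_ordered[i]:
-- 				count += 1
-- 			else :
-- 				freq.append(count)
-- 				i += 1
-- 				count = 1
-- 		freq.append(count)
-- 		freqs_r.append(freq)
-- 	freqs = [sorted(list(x)) for x in zip(*freqs_r)]
-- 	#print freqs
-- 	# prev_ordered is the basic string.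
-- 	#freqs = [sorted([count[c] for count in counters ]) for c in prev_ordered]
-- 	#print freqs
-- 	total = 0
-- 	for freq in freqs:
-- 		mid = int(len(freq)/2)
-- 		num = freq[mid]
-- 		#print "num", num
-- 		for f in freq:
-- 			total += abs(f-num)
-- 	return total
-- ===== SOURCE B (Python) =====
-- def identical(strings):
--     if not strings:
--         return 0
--     sigs = []
--     lens = []
--     for s in strings:
--         sig = []
--         runs = []
--         i = 0
--         n = len(s)
--         while i < n:
--             j = i
--             while j < n and s[j] == s[i]:
--                 j += 1
--             sig.append(s[i])
--             runs.append(j - i)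
--             i = j
--         sigs.append(sig)
--         lens.append(runs)
--     if any(sig != sigs[0] for sig in sigs[1:]):
--         return -1
--     total = 0
--     for pos in range(len(lens[0])):
--         col = [r[pos] for r in lens]
--         total += min(sum(abs(f - x) for f in col) for x in col)
--     return total
-- ===== Notes on version B (the rewrite author's own statement) =====
-- stated objective: alternative
-- what changed: B extracts runs with an index/two-pointer sweep (inner while over equal chars) and computes each position's cost as the minimum over candidate target lengths of the total adjustment (brute-force 1-D facility location, no sorting and no median), instead of A's dedup pass, recount-against-prev pass, per-column sort and median absolute-deviation sum.
-- intended difference: On lists whose empty strings form a nonempty proper prefix while all the nonempty strings share one run-letter sequence (e.g. ["","a"]), A skips its mismatch check while prev_ordered is empty and returns a count computed over zip-truncated columns (1 for ["","a"]), whereas B returns -1, the intended answer since an empty and a nonempty string can never be made identical. — e.g. on identical(["", "a"]): A returns 1, B returns -1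
import Mathlib
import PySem

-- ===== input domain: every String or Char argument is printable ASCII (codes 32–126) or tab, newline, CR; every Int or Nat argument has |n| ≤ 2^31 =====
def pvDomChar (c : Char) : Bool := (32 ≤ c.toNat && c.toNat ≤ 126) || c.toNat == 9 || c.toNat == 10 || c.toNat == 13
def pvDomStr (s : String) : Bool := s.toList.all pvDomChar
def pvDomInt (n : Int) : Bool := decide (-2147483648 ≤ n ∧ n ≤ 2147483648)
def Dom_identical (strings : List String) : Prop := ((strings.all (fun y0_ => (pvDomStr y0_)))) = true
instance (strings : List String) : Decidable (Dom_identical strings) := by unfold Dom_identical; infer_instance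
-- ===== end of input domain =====

-- B scans runs with an index/two-pointer sweep and takes, per run position, the minimum total
-- adjustment over candidate target lengths (no sorting, no median), instead of A's dedup/recount
-- passes, column sort and median absolute-deviation sum (objective: alternative); on lists whose
-- empty strings form a leading prefix before equal nonempty strings A returns a zip-truncated
-- count while B returns the intended -1 (see D_identical below).


-- ===== PORT A =====
-- the inner olist loop: append s unless it repeats olist[-1] (olist[-1] is safe: guarded nonempty)
def pvDedupA (s : List Char) : List Char :=
  s.foldl (fun olist c => if olist.length ≠ 0 ∧ c = olist.getLastD ' ' then olist else olist ++ [c]) []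

-- the first for-loop with its early 'return -1' (none = -1), threading prev_ordered
def pvPhase1 : List String → List Char → Option (List Char)
  | [], prev => some prev
  | s :: rest, prev =>
    let ordered := pvDedupA s.toList
    if prev ≠ [] ∧ ordered ≠ prev then none
    else pvPhase1 rest ordered

-- the freq/count/i loop of the second phase (prev_ordered[i] is safe: guarded i < len)
def pvFreqA (prev : List Char) (s : List Char) : List Int :=
  let st := s.foldl (fun (st : List Int × Int × Int) c =>
    if st.2.2 < (prev.length : Int) ∧ PySem.List.pyGetD prev st.2.2 ' ' = c
    then (st.1, st.2.1 + 1, st.2.2)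
    else (st.1 ++ [st.2.1], 1, st.2.2 + 1)) ([], 0, 0)
  st.1 ++ [st.2.1]

-- hand port of zip(*rows), exact: the j-th elements of every row, up to the shortest row
def pvTransposeA (rows : List (List Int)) : List (List Int) :=
  match rows with
  | [] => []
  | r0 :: rest =>
    let m := rest.foldl (fun acc r => min acc r.length) r0.length
    (List.range m).map (fun j => (r0 :: rest).map (fun r => r.getD j 0))

def identical (strings : List String) : Int :=
  match pvPhase1 strings [] with
  | none => -1
  | some prev =>
    let freqsR := strings.foldl (fun acc s => acc ++ [pvFreqA prev s.toList]) []
    let freqs := (pvTransposeA freqsR).map (fun col => PySem.List.sorted col (fun x => x) false)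
    freqs.foldl (fun total freq =>
      let mid : Nat := freq.length / 2
      let num := PySem.List.pyGetD freq (mid : Int) 0
      freq.foldl (fun t f => t + |f - num|) total) 0

-- ===== PORT B =====
-- the two-pointer scan: run start c with j-i = k so far; 'while s[j] == s[i]' steps k,
-- hitting a different char closes the run (append sig char and length) and restarts there
def pvScanRun (c : Char) (k : Int) : List Char → List Char × List Int
  | [] => ([c], [k])
  | x :: t =>
    if x == c then pvScanRun c (k + 1) t
    else
      let p := pvScanRun x 1 t
      (c :: p.1, k :: p.2)

def pvScan : List Char → List Char × List Int
  | [] => ([], [])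
  | c :: t => pvScanRun c 1 t

-- min(sum(abs(f - x) for f in col) for x in col); col is nonempty wherever B evaluates this
def pvColCost (col : List Int) : Int :=
  match col.map (fun x => (col.map (fun f => |f - x|)).sum) with
  | [] => 0
  | c :: cs => cs.foldl min c

def identical_alt (strings : List String) : Int :=
  match strings with
  | [] => 0
  | _ :: _ =>
    let pairs := strings.map (fun s => pvScan s.toList)
    let sigs := pairs.map Prod.fst
    let lens := pairs.map Prod.snd
    if (sigs.tail).any (fun sig => sig ≠ sigs.head!) then -1
    else
      (PySem.List.pyRange 0 ((lens.head!).length : Int)).foldl (fun total pos =>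
        let col := lens.map (fun r => PySem.List.pyGetD r pos 0)  -- r[pos], in range here
        total + pvColCost col) 0

-- ===== PRECONDITION & SPEC =====
-- On lists whose empty strings form a nonempty proper prefix while all nonempty strings share one
-- run-letter sequence, A skips its mismatch check (prev_ordered still empty) and returns a count
-- over zip-truncated columns; B returns -1, the intended answer (an empty and a nonempty string
-- can never be made identical).
def D_identical (strings : List String) : Prop :=
  strings.takeWhile (fun s => s == "") ≠ [] ∧
  strings.dropWhile (fun s => s == "") ≠ [] ∧
  ∀ s ∈ strings.dropWhile (fun s => s == ""),
    s ≠ "" ∧ s.toList.destutter (· ≠ ·)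
      = ((strings.dropWhile (fun s => s == "")).head!).toList.destutter (· ≠ ·)
instance (strings : List String) : Decidable (D_identical strings) := by
  unfold D_identical; infer_instance

def Spec_identical (strings : List String) (out : Int) : Prop :=
  ¬ D_identical strings → out = identical_alt strings
instance (strings : List String) (out : Int) : Decidable (Spec_identical strings out) := by
  unfold Spec_identical; infer_instance

def pvDiffWitness_identical : List String := ["", "a"]
def pvDiffWitnessOut_identical : Int × Int := (1, -1)

-- ===== CLAIM (what is proved, stated in full; the proofs are below) =====
def Claim_unchanged_identical : Prop :=
  ∀ (strings : List String), Dom_identical strings → Spec_identical strings (identical strings)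
def Claim_changed_identical : Prop :=
  Dom_identical (pvDiffWitness_identical) ∧ D_identical (pvDiffWitness_identical) ∧
  identical (pvDiffWitness_identical) = pvDiffWitnessOut_identical.1 ∧
  identical_alt (pvDiffWitness_identical) = pvDiffWitnessOut_identical.2 ∧
  pvDiffWitnessOut_identical.1 ≠ pvDiffWitnessOut_identical.2
def Claim_exact_identical : Prop :=
  ∀ (strings : List String), Dom_identical strings → D_identical strings →
    identical strings ≠ identical_alt strings

-- ===== LEMMAS AND PROOFS =====

-- run-letter sequence (proof-side only)
def pvCdedupFrom : Char → List Char → List Char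
  | _, [] => []
  | c, x :: t => if x = c then pvCdedupFrom c t else x :: pvCdedupFrom x t

def pvCdedup : List Char → List Char
  | [] => []
  | c :: t => c :: pvCdedupFrom c t

theorem pvDestutter' (l : List Char) :
    ∀ a : Char, List.destutter' (· ≠ ·) a l = a :: pvCdedupFrom a l := by
  induction l with
  | nil => intro a; rfl
  | cons b l' ih =>
    intro a
    by_cases h : a = b
    · subst h
      simp [List.destutter', pvCdedupFrom, ih]
    · have h1 : List.destutter' (fun x1 x2 => x1 ≠ x2) a (b :: l')
          = a :: List.destutter' (fun x1 x2 => x1 ≠ x2) b l' := by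
        simp [List.destutter', h]
      have h2 : pvCdedupFrom a (b :: l') = b :: pvCdedupFrom b l' := by
        simp only [pvCdedupFrom]
        rw [if_neg (fun hh => h hh.symm)]
      rw [h1, h2, ih b]

theorem pvCdedup_eq_destutter (l : List Char) : l.destutter (· ≠ ·) = pvCdedup l := by
  cases l with
  | nil => rfl
  | cons a t => simp [List.destutter, pvDestutter', pvCdedup]

-- canonical run lengths (proof-side only)
def pvRlsp : Char → Int → List Char → List Int
  | _, k, [] => [k]
  | c, k, x :: t => if x = c then pvRlsp c (k + 1) t else k :: pvRlsp x 1 t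

def pvRunLens : List Char → List Int
  | [] => []
  | c :: t => pvRlsp c 1 t

-- A's olist loop computes the canonical dedup
theorem pvDedup_loop (s : List Char) : ∀ (front : List Char) (c : Char),
    s.foldl (fun olist x => if olist.length ≠ 0 ∧ x = olist.getLastD ' ' then olist else olist ++ [x])
      (front ++ [c]) = front ++ c :: pvCdedupFrom c s := by
  induction s with
  | nil => intro front c; simp [pvCdedupFrom]
  | cons x t ih =>
    intro front c
    rw [List.foldl_cons]
    by_cases hx : x = c
    · subst hx
      rw [if_pos ⟨by simp, (List.getLastD_concat ..).symm⟩,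
        show pvCdedupFrom x (x :: t) = pvCdedupFrom x t from by simp [pvCdedupFrom]]
      exact ih front x
    · rw [if_neg (fun h => hx (by have h2 := h.2; rwa [List.getLastD_concat] at h2)),
        show pvCdedupFrom c (x :: t) = x :: pvCdedupFrom x t from by simp [pvCdedupFrom, hx],
        ih (front ++ [c]) x]
      simp

theorem pvDedupA_eq (s : List Char) : pvDedupA s = pvCdedup s := by
  cases s with
  | nil => rfl
  | cons c t =>
    show List.foldl _ ([] ++ [c]) t = _
    rw [pvDedup_loop t [] c]
    rfl

-- B's scan computes the canonical dedup and run lengths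
theorem pvScanRun_fst (t : List Char) : ∀ (c : Char) (k : Int),
    (pvScanRun c k t).1 = c :: pvCdedupFrom c t := by
  induction t with
  | nil => intro c k; simp [pvScanRun, pvCdedupFrom]
  | cons x u ih =>
    intro c k
    by_cases hx : x = c
    · subst hx
      simp [pvScanRun, pvCdedupFrom, ih]
    · simp [pvScanRun, pvCdedupFrom, hx, ih]

theorem pvScanRun_snd (t : List Char) : ∀ (c : Char) (k : Int),
    (pvScanRun c k t).2 = pvRlsp c k t := by
  induction t with
  | nil => intro c k; simp [pvScanRun, pvRlsp]
  | cons x u ih =>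
    intro c k
    by_cases hx : x = c
    · subst hx
      simp [pvScanRun, pvRlsp, ih]
    · simp [pvScanRun, pvRlsp, hx, ih]

theorem pvScan_fst (s : List Char) : (pvScan s).1 = pvCdedup s := by
  cases s with
  | nil => rfl
  | cons c t => rw [pvScan, pvScanRun_fst, pvCdedup]

theorem pvScan_snd (s : List Char) : (pvScan s).2 = pvRunLens s := by
  cases s with
  | nil => rfl
  | cons c t => rw [pvScan, pvScanRun_snd, pvRunLens]

-- A's re-counting loop computes the canonical run lengths
theorem pvFreq_loop (prev : List Char) (s : List Char) :
    ∀ (i : Nat) (c : Char) (k : Int) (freq : List Int),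
    prev.drop i = c :: pvCdedupFrom c s →
    (let st := s.foldl (fun (st : List Int × Int × Int) x =>
        if st.2.2 < (prev.length : Int) ∧ PySem.List.pyGetD prev st.2.2 ' ' = x
        then (st.1, st.2.1 + 1, st.2.2)
        else (st.1 ++ [st.2.1], 1, st.2.2 + 1)) (freq, k, (i : Int))
     st.1 ++ [st.2.1]) = freq ++ pvRlsp c k s := by
  induction s with
  | nil => intro i c k freq _; simp [pvRlsp]
  | cons x t ih =>
    intro i c k freq hdrop
    have hilen : i < prev.length := by
      by_contra h
      rw [List.drop_eq_nil_of_le (by omega)] at hdrop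
      exact absurd hdrop (by simp)
    have hget : prev[i] = c := by
      have h0 : (prev.drop i)[0]'(by simp [hdrop]) = c := by simp [hdrop]
      simpa [List.getElem_drop] using h0
    have hpy : PySem.List.pyGetD prev (i : Int) ' ' = prev[i] := by
      rw [PySem.List.pyGetD_natCast, List.getD_eq_getElem _ _ hilen]
    by_cases hx : x = c
    · subst hx
      simp only [List.foldl_cons]
      rw [if_pos ⟨by exact_mod_cast hilen, hpy.trans hget⟩]
      have hrest : prev.drop i = x :: pvCdedupFrom x t := by
        rw [hdrop]; simp [pvCdedupFrom]
      have := ih i x (k + 1) freq hrest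
      simp only [pvRlsp]
      exact this
    · simp only [List.foldl_cons]
      rw [if_neg (by rintro ⟨-, h2⟩; rw [hpy, hget] at h2; exact hx h2.symm)]
      have hrest : prev.drop (i + 1) = x :: pvCdedupFrom x t := by
        have : (prev.drop i).tail = prev.drop (i + 1) := by
          rw [List.tail_drop]
        rw [← this, hdrop]
        simp [pvCdedupFrom, hx]
      have := ih (i + 1) x 1 (freq ++ [k]) hrest
      simp only [pvRlsp, if_neg hx]
      push_cast at this
      rw [this, List.append_assoc]
      rfl

theorem pvFreqA_eq (s : List Char) (hs : s ≠ []) : pvFreqA (pvCdedup s) s = pvRunLens s := by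
  cases s with
  | nil => exact absurd rfl hs
  | cons c t =>
    have h0 : (pvCdedup (c :: t)).drop 0 = c :: pvCdedupFrom c (c :: t) := by
      simp [pvCdedup, pvCdedupFrom]
    have := pvFreq_loop (pvCdedup (c :: t)) (c :: t) 0 c 0 [] h0
    unfold pvFreqA
    simp only [Nat.cast_zero] at this
    rw [this]
    simp [pvRlsp, pvRunLens]

theorem pvRlsp_length (s : List Char) : ∀ c k, (pvRlsp c k s).length = (pvCdedupFrom c s).length + 1 := by
  induction s with
  | nil => intro c k; simp [pvRlsp, pvCdedupFrom]
  | cons x t ih =>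
    intro c k
    by_cases hx : x = c
    · subst hx; simp [pvRlsp, pvCdedupFrom, ih]
    · simp [pvRlsp, pvCdedupFrom, hx, ih]

theorem pvRunLens_length (s : List Char) : (pvRunLens s).length = (pvCdedup s).length := by
  cases s with
  | nil => rfl
  | cons c t => simp [pvRunLens, pvCdedup, pvRlsp_length]

theorem pvCdedup_ne_nil (s : List Char) (hs : s ≠ []) : pvCdedup s ≠ [] := by
  cases s with
  | nil => exact absurd rfl hs
  | cons c t => simp [pvCdedup]

-- phase 1 characterisation
theorem pvPhase1_ne (l : List String) : ∀ (prev : List Char), prev ≠ [] →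
    pvPhase1 l prev =
      if ∀ s ∈ l, pvCdedup s.toList = prev then some prev else none := by
  induction l with
  | nil => intro prev _; simp [pvPhase1]
  | cons s t ih =>
    intro prev hprev
    simp only [pvPhase1, pvDedupA_eq]
    by_cases hs : pvCdedup s.toList = prev
    · rw [if_neg (by simp [hs]), hs, ih prev hprev]
      simp [hs]
    · rw [if_pos ⟨hprev, hs⟩, if_neg (fun hall => hs (hall s (by simp)))]

theorem pvPhase1_nil (l : List String) :
    pvPhase1 l [] =
      match l.dropWhile (fun s => s == "") with
      | [] => some []
      | s :: t =>
        if ∀ s' ∈ t, pvCdedup s'.toList = pvCdedup s.toList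
        then some (pvCdedup s.toList) else none := by
  induction l with
  | nil => simp [pvPhase1]
  | cons s t ih =>
    by_cases hs : s = ""
    · subst hs
      simp only [pvPhase1, pvDedupA_eq]
      rw [if_neg (by simp [pvCdedup])]
      rw [show pvCdedup ("".toList) = ([] : List Char) from rfl, ih]
      simp [List.dropWhile]
    · have hsl : s.toList ≠ [] := by
        intro h
        exact hs (String.toList_inj.mp (h.trans rfl))
      have hne := pvCdedup_ne_nil s.toList hsl
      simp only [pvPhase1, pvDedupA_eq]
      rw [if_neg (by simp)]
      rw [pvPhase1_ne t _ hne]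
      have hdw : (s :: t).dropWhile (fun s => s == "") = s :: t := by
        rw [List.dropWhile_cons_of_neg (by simp [hs])]
      rw [hdw]

-- sum helpers
theorem pvSum_sub_left (L : List Int) (m : Int) :
    (L.map (fun x => m - x)).sum = L.length * m - L.sum := by
  induction L with
  | nil => simp
  | cons x t ih => simp [ih]; ring

theorem pvSum_sub_right (L : List Int) (m : Int) :
    (L.map (fun x => x - m)).sum = L.sum - L.length * m := by
  induction L with
  | nil => simp
  | cons x t ih => simp [ih]; ring

-- the half-difference value of a column (upper-half sum minus lower-half sum)
def pvD (l : List Int) : Int :=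
  (l.drop (l.length / 2 + l.length % 2)).sum - (l.take (l.length / 2)).sum

-- the column lemma: on a sorted nonempty column, A's |f - median| sum is the half-difference
theorem pvHalf_sum (l : List Int) (hs : l.Pairwise (· ≤ ·)) (hne : l ≠ []) (t0 : Int) :
    l.foldl (fun t f => t + |f - PySem.List.pyGetD l ((l.length / 2 : Nat) : Int) 0|) t0
      = t0 + pvD l := by
  have hlen : 0 < l.length := List.length_pos_iff.mpr hne
  set n := l.length with hn
  set h := n / 2 with hh
  have hhn : h < n := Nat.div_lt_self hlen (by omega)
  set m := PySem.List.pyGetD l ((h : Nat) : Int) 0 with hm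
  have hm' : m = l[h] := by
    rw [hm, PySem.List.pyGetD_natCast, List.getD_eq_getElem _ _ hhn]
  have hmono : ∀ p q, (hp : p ≤ q) → (hq : q < n) → l[p]'(by omega) ≤ l[q]'hq := by
    intro p q hp hq
    rcases eq_or_lt_of_le hp with rfl | hlt
    · exact le_refl _
    · exact List.pairwise_iff_getElem.mp hs p q (by omega) hq hlt
  rw [PySem.List.foldl_add]
  congr 1
  have hsplit : l.map (fun f => |f - m|) =
      (l.take h).map (fun f => |f - m|) ++ (l.drop h).map (fun f => |f - m|) := by
    rw [← List.map_append, List.take_append_drop]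
  have htake : ∀ x ∈ l.take h, x ≤ m := by
    intro x hx
    rw [List.mem_take_iff_getElem] at hx
    obtain ⟨i, hi, rfl⟩ := hx
    have hi' : i < h := lt_of_lt_of_le hi (min_le_left _ _)
    rw [hm']
    exact hmono i h (by omega) hhn
  have hdropge : ∀ x ∈ l.drop h, m ≤ x := by
    intro x hx
    rw [List.mem_iff_getElem] at hx
    obtain ⟨j, hj, rfl⟩ := hx
    rw [List.getElem_drop, hm']
    exact hmono h (h + j) (by omega) (by rw [List.length_drop] at hj; omega)
  have e1 : (l.take h).map (fun f => |f - m|) = (l.take h).map (fun f => m - f) :=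
    List.map_congr_left (fun x hx => by
      have := htake x hx
      rw [abs_of_nonpos (by omega)]; ring)
  have e2 : (l.drop h).map (fun f => |f - m|) = (l.drop h).map (fun f => f - m) :=
    List.map_congr_left (fun x hx => by
      have := hdropge x hx
      rw [abs_of_nonneg (by omega)])
  rw [pvD, hsplit, List.sum_append, e1, e2, pvSum_sub_left, pvSum_sub_right,
    List.length_take, List.length_drop]
  have hmin : min h n = h := by omega
  rcases Nat.mod_two_eq_zero_or_one n with hpar | hpar
  · rw [hpar, Nat.add_zero]
    have hc : ((n - h : Nat) : Int) = (h : Int) := by omega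
    rw [hmin, hc]
    ring
  · rw [hpar]
    have hdc : l.drop h = l[h] :: l.drop (h + 1) := List.drop_eq_getElem_cons hhn
    rw [hdc, List.sum_cons, ← hm']
    have hc : ((n - h : Nat) : Int) = (h : Int) + 1 := by
      rw [← hn] at *
      omega
    rw [hmin, hc]
    ring

-- B's column cost: the minimum of Σ|f - x| over x ∈ col equals the half-difference of sorted col

-- peeling both ends off the half-difference (purely positional, no order needed)
theorem pvD_peel (a b : Int) (m : List Int) : pvD (a :: (m ++ [b])) = (b - a) + pvD m := by
  set k := m.length with hk
  have hlen : (a :: (m ++ [b])).length = k + 2 := by simp [hk]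
  have hdiv : (k + 2) / 2 = k / 2 + 1 := by omega
  have hmod : (k + 2) % 2 = k % 2 := by omega
  have ht2 : k / 2 ≤ k := Nat.div_le_self k 2
  have hd2 : k / 2 + k % 2 ≤ k := by omega
  rw [pvD, pvD, hlen, hdiv, hmod]
  rw [show (k / 2 + 1 + k % 2) = (k / 2 + k % 2) + 1 by omega]
  rw [List.drop_succ_cons, List.take_succ_cons,
    List.drop_append_of_le_length (by omega), List.take_append_of_le_length (by omega),
    List.sum_append, List.sum_cons]
  simp
  ring

-- lower bound: for a sorted list, Σ|f - x| ≥ pvD for EVERY x (pair the extremes, recurse)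
theorem pvD_lower_n (n : Nat) : ∀ (l : List Int), l.length = n → l.Pairwise (· ≤ ·) →
    ∀ x : Int, pvD l ≤ (l.map (fun f => |f - x|)).sum := by
  induction n using Nat.strong_induction_on with
  | _ n ih =>
    intro l hl hs x
    match l with
    | [] => simp [pvD]
    | [a] =>
      simp [pvD]
    | a :: d :: t =>
      have htne : (d :: t) ≠ [] := by simp
      set b := (d :: t).getLast htne with hb
      set m := (d :: t).dropLast with hmm
      have hdecomp : d :: t = m ++ [b] := (List.dropLast_append_getLast htne).symm
      have hml : m.length + 1 = (d :: t).length := by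
        rw [hmm, List.length_dropLast]; simp
      have hsm : (m ++ [b]).Pairwise (· ≤ ·) := by
        rw [← hdecomp]; exact hs.sublist (List.sublist_cons_self _ _)
      have hpm : m.Pairwise (· ≤ ·) := hsm.sublist (List.sublist_append_left _ _)
      have hab : a ≤ b := (List.pairwise_cons.mp hs).1 b (by rw [hb]; exact List.getLast_mem htne)
      have hln : n = t.length + 2 := by simpa using hl.symm
      have hml' : m.length = t.length := by simpa using hml
      have hIH : pvD m ≤ (m.map (fun f => |f - x|)).sum := by
        refine ih m.length (by omega) m rfl hpm x
      have htri : b - a ≤ |a - x| + |b - x| := by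
        have h1 : x - a ≤ |a - x| := by rw [abs_sub_comm]; exact le_abs_self _
        have h2 : b - x ≤ |b - x| := le_abs_self _
        omega
      have hmap : ((a :: (m ++ [b])).map (fun f => |f - x|)).sum
          = |a - x| + ((m.map (fun f => |f - x|)).sum + |b - x|) := by
        simp [List.map_append]
      calc pvD (a :: d :: t) = pvD (a :: (m ++ [b])) := by rw [hdecomp]
        _ = (b - a) + pvD m := pvD_peel a b m
        _ ≤ (|a - x| + |b - x|) + (m.map (fun f => |f - x|)).sum := by omega
        _ = ((a :: (m ++ [b])).map (fun f => |f - x|)).sum := by rw [hmap]; ring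
        _ = ((a :: d :: t).map (fun f => |f - x|)).sum := by rw [hdecomp]

theorem pvD_lower (l : List Int) (hs : l.Pairwise (· ≤ ·)) (x : Int) :
    pvD l ≤ (l.map (fun f => |f - x|)).sum :=
  pvD_lower_n l.length l rfl hs x

-- the median attains the bound
theorem pvD_attained (l : List Int) (hs : l.Pairwise (· ≤ ·)) (hne : l ≠ []) :
    (l.map (fun f => |f - PySem.List.pyGetD l ((l.length / 2 : Nat) : Int) 0|)).sum = pvD l := by
  have h := pvHalf_sum l hs hne 0
  rw [PySem.List.foldl_add] at h
  omega

-- folding min over a list bounded below by v and containing v gives v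
theorem pvFoldl_min_le_init (cs : List Int) : ∀ c : Int, cs.foldl min c ≤ c := by
  induction cs with
  | nil => intro c; simp
  | cons x t ih => intro c; exact le_trans (ih (min c x)) (min_le_left _ _)

theorem pvFoldl_min_le_mem (cs : List Int) : ∀ (c : Int), ∀ y ∈ c :: cs, cs.foldl min c ≤ y := by
  induction cs with
  | nil => intro c y hy; simp at hy; simp [hy]
  | cons x t ih =>
    intro c y hy
    rcases List.mem_cons.mp hy with rfl | hy'
    · exact le_trans (pvFoldl_min_le_init t (min y x)) (min_le_left _ _)
    · rcases List.mem_cons.mp hy' with rfl | hy'' 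
      · exact le_trans (pvFoldl_min_le_init t (min c y)) (min_le_right _ _)
      · exact ih (min c x) y (List.mem_cons_of_mem _ hy'')

theorem pvFoldl_min_ge (cs : List Int) : ∀ (c v : Int), v ≤ c → (∀ y ∈ cs, v ≤ y) →
    v ≤ cs.foldl min c := by
  induction cs with
  | nil => intro c v hc _; simpa using hc
  | cons x t ih =>
    intro c v hc hall
    exact ih (min c x) v (le_min hc (hall x (by simp))) (fun y hy => hall y (by simp [hy]))

theorem pvColCost_eq (col : List Int) (hne : col ≠ []) :
    pvColCost col = pvD (PySem.List.sorted col (fun x => x) false) := by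
  set l := PySem.List.sorted col (fun x => x) false with hl
  have hperm : l.Perm col := PySem.List.sorted_perm ..
  have hlne : l ≠ [] := by rw [hl, Ne, PySem.List.sorted_eq_nil_iff]; exact hne
  have hpw : l.Pairwise (· ≤ ·) := by
    have := PySem.List.sorted_pairwise col (fun x : Int => x) (κ := Int)
    simpa [hl] using this
  have hSeq : ∀ x : Int, (col.map (fun f => |f - x|)).sum = (l.map (fun f => |f - x|)).sum :=
    fun x => ((hperm.map _).sum_eq).symm
  have hh : l.length / 2 < l.length := Nat.div_lt_self (List.length_pos_iff.mpr hlne) (by omega)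
  set med := PySem.List.pyGetD l ((l.length / 2 : Nat) : Int) 0 with hmed
  have hmedmem : med ∈ col := by
    rw [← hperm.mem_iff]
    rw [hmed, PySem.List.pyGetD_natCast, List.getD_eq_getElem _ _ hh]
    exact List.getElem_mem _
  have hmedval : (col.map (fun f => |f - med|)).sum = pvD l := by
    rw [hSeq]; exact pvD_attained l hpw hlne
  -- the costs list
  unfold pvColCost
  cases hcs : col.map (fun x => (col.map (fun f => |f - x|)).sum) with
  | nil => exact absurd (List.map_eq_nil_iff.mp hcs) hne
  | cons c cs =>
    have hallge : ∀ y ∈ c :: cs, pvD l ≤ y := by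
      intro y hy
      rw [← hcs] at hy
      obtain ⟨x, _, rfl⟩ := List.mem_map.mp hy
      rw [hSeq]
      exact pvD_lower l hpw x
    have hmemv : pvD l ∈ c :: cs := by
      rw [← hcs]
      exact List.mem_map.mpr ⟨med, hmedmem, hmedval⟩
    exact le_antisymm (pvFoldl_min_le_mem cs c (pvD l) hmemv)
      (pvFoldl_min_ge cs c (pvD l) (hallge c (by simp)) (fun y hy => hallge y (by simp [hy])))

-- monotone fold lemma (for tightness)
theorem pvFoldl_le {α : Type} (l : List α) (f : Int → α → Int)
    (hf : ∀ acc x, acc ≤ f acc x) : ∀ a, a ≤ l.foldl f a := by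
  induction l with
  | nil => intro a; simp
  | cons x t ih => intro a; exact le_trans (hf a x) (ih (f a x))

-- the common value both programs compute in the agreeing case
def pvCost (strings : List String) (L : Nat) : Int :=
  ((List.range L).map (fun j =>
    pvD (PySem.List.sorted (strings.map (fun s' => (pvRunLens s'.toList).getD j 0))
      (fun x => x) false))).sum

theorem pvFoldl_min_const (l : List (List Int)) (L : Nat) (h : ∀ r ∈ l, r.length = L) :
    l.foldl (fun acc r => min acc r.length) L = L := by
  induction l with
  | nil => rfl
  | cons r rest ih =>
    rw [List.foldl_cons, h r (by simp), min_self]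
    exact ih (fun r hr => h r (by simp [hr]))

theorem pvTransposeA_eq (rows : List (List Int)) (L : Nat) (hne : rows ≠ [])
    (hlen : ∀ r ∈ rows, r.length = L) :
    pvTransposeA rows = (List.range L).map (fun j => rows.map (fun r => r.getD j 0)) := by
  cases rows with
  | nil => exact absurd rfl hne
  | cons r0 rest =>
    show (List.range (rest.foldl (fun acc r => min acc r.length) r0.length)).map _ = _
    rw [hlen r0 (by simp), pvFoldl_min_const rest L (fun r hr => hlen r (by simp [hr]))]

theorem pvDropWhile_head {α : Type} (p : α → Bool) (l : List α) (r0 : α) (r' : List α)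
    (h : l.dropWhile p = r0 :: r') : p r0 = false := by
  induction l with
  | nil => simp at h
  | cons a l ih =>
    by_cases hp : p a
    · rw [List.dropWhile_cons_of_pos hp] at h; exact ih h
    · rw [List.dropWhile_cons_of_neg hp] at h
      rw [← List.cons.injEq .. |>.mp h |>.1]
      simpa using hp

theorem pvStr_ne_nil (s : String) (hs : s ≠ "") : s.toList ≠ [] := by
  intro h
  exact hs (String.toList_inj.mp (h.trans rfl))

theorem pvFold_cost (cols : List (List Int)) (hnz : ∀ c ∈ cols, c ≠ []) : ∀ init : Int,
    (cols.map (fun col => PySem.List.sorted col (fun x => x) false)).foldl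
      (fun total freq =>
        freq.foldl (fun t f => t + |f - PySem.List.pyGetD freq ((freq.length / 2 : Nat) : Int) 0|) total) init
    = init + (cols.map (fun col => pvD (PySem.List.sorted col (fun x => x) false))).sum := by
  induction cols with
  | nil => intro init; simp
  | cons c cs ih =>
    intro init
    rw [List.map_cons, List.foldl_cons,
      pvHalf_sum _ (PySem.List.sorted_pairwise ..)
        (by rw [Ne, PySem.List.sorted_eq_nil_iff]; exact hnz c (by simp)) init,
      ih (fun c hc => hnz c (by simp [hc])) _, List.map_cons, List.sum_cons]
    ring

-- A's value in the agreeing case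
theorem pvA_eq_cost (strings : List String) (prev : List Char) (hne : strings ≠ [])
    (hp : pvPhase1 strings [] = some prev)
    (hall : ∀ s' ∈ strings, s'.toList ≠ [] ∧ pvCdedup s'.toList = prev) :
    identical strings = pvCost strings prev.length := by
  simp only [identical, hp, PySem.List.foldl_append_singleton_eq_map, List.nil_append]
  have hrows : strings.map (fun s' => pvFreqA prev s'.toList)
      = strings.map (fun s' => pvRunLens s'.toList) :=
    List.map_congr_left (fun x hx => by
      rw [← (hall x hx).2]; exact pvFreqA_eq _ (hall x hx).1)
  rw [hrows]
  rw [pvTransposeA_eq _ prev.length (by simpa using hne)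
    (by
      intro r hr
      rw [List.mem_map] at hr
      obtain ⟨x, hx, rfl⟩ := hr
      rw [pvRunLens_length, (hall x hx).2])]
  rw [pvFold_cost _ (by
      intro c hc
      rw [List.mem_map] at hc
      obtain ⟨j, hj, rfl⟩ := hc
      simpa using hne) 0]
  rw [zero_add]
  simp only [pvCost, List.map_map, Function.comp_def]

-- B's value in the agreeing case
theorem pvAlt_eq_cost (s : String) (t : List String)
    (_hs : s.toList ≠ [])
    (h : ∀ s' ∈ t, pvCdedup s'.toList = pvCdedup s.toList) :
    identical_alt (s :: t) = pvCost (s :: t) (pvCdedup s.toList).length := by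
  simp only [identical_alt, List.map_cons, List.map_map, Function.comp_def,
    List.head!_cons, List.tail_cons]
  split_ifs with hcond
  · exfalso
    simp only [List.any_eq_true, List.mem_map, decide_eq_true_eq] at hcond
    obtain ⟨x, hx, hcon⟩ := hcond
    obtain ⟨a, ha, rfl⟩ := hx
    exact hcon (by rw [pvScan_fst, h a ha, pvScan_fst])
  · simp only [pvScan_snd]
    rw [pvRunLens_length, PySem.List.pyRange_zero_natCast, List.foldl_map,
      PySem.List.foldl_add, zero_add]
    simp only [pvCost]
    refine congrArg List.sum (List.map_congr_left ?_)
    intro j hj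
    rw [List.mem_range] at hj
    have hcols : PySem.List.pyGetD (pvRunLens s.toList) ((j : Nat) : Int) 0
          :: t.map (fun x => PySem.List.pyGetD (pvRunLens x.toList) ((j : Nat) : Int) 0)
        = (s :: t).map (fun s' => (pvRunLens s'.toList).getD j 0) := by
      rw [List.map_cons]
      congr 1
      · rw [PySem.List.pyGetD_natCast]
      · exact List.map_congr_left (fun x _ => by rw [PySem.List.pyGetD_natCast])
    rw [hcols, pvColCost_eq _ (by simp)]

theorem pvAlt_neg (s : String) (t : List String)
    (h : ∃ s' ∈ t, pvCdedup s'.toList ≠ pvCdedup s.toList) :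
    identical_alt (s :: t) = -1 := by
  simp only [identical_alt, List.map_cons, List.map_map, Function.comp_def,
    List.head!_cons, List.tail_cons]
  rw [if_pos (by
    simp only [List.any_eq_true, List.mem_map, decide_eq_true_eq]
    obtain ⟨x, hx, hne⟩ := h
    refine ⟨(pvScan x.toList).1, ⟨x, hx, rfl⟩, ?_⟩
    rw [pvScan_fst, pvScan_fst]
    exact hne)]

theorem pvPhase1_nil_nil (l : List String) (hdw : l.dropWhile (fun s => s == "") = []) :
    pvPhase1 l [] = some [] := by
  rw [pvPhase1_nil, hdw]

theorem pvPhase1_nil_cons (l : List String) (r0 : String) (r' : List String)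
    (hdw : l.dropWhile (fun s => s == "") = r0 :: r') :
    pvPhase1 l [] =
      if ∀ s' ∈ r', pvCdedup s'.toList = pvCdedup r0.toList
      then some (pvCdedup r0.toList) else none := by
  rw [pvPhase1_nil, hdw]

theorem pvPhase1_cons_empty (t : List String) : pvPhase1 ("" :: t) [] = pvPhase1 t [] := rfl

theorem pvAlt_empty (t : List String) (h : ∀ x ∈ t, x = "") :
    identical_alt ("" :: t) = 0 := by
  simp only [identical_alt, List.map_cons, List.map_map, Function.comp_def,
    List.head!_cons, List.tail_cons]
  split_ifs with hcond
  · exfalso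
    simp only [List.any_eq_true, List.mem_map, decide_eq_true_eq] at hcond
    obtain ⟨x, hx, hcon⟩ := hcond
    obtain ⟨a, ha, rfl⟩ := hx
    rw [h a ha] at hcon
    exact hcon rfl
  · rfl

theorem pvA_empty (t : List String) (h : ∀ x ∈ t, x = "") :
    identical ("" :: t) = 0 := by
  have hp : pvPhase1 ("" :: t) [] = some [] := by
    refine pvPhase1_nil_nil _ ?_
    rw [List.dropWhile_cons_of_pos (by simp), List.dropWhile_eq_nil_iff]
    intro x hx
    simp [h x hx]
  simp only [identical, hp, PySem.List.foldl_append_singleton_eq_map, List.nil_append]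
  have hrows : ("" :: t).map (fun s' => pvFreqA [] s'.toList) = ("" :: t).map (fun _ => [(0 : Int)]) :=
    List.map_congr_left (fun x hx => by
      have hx0 : x = "" := by
        rcases List.mem_cons.mp hx with rfl | hx'
        · rfl
        · exact h x hx'
      rw [hx0]
      rfl)
  rw [hrows, List.map_const']
  rw [pvTransposeA_eq _ 1 (by simp)
    (by intro r hr; rw [List.eq_of_mem_replicate hr]; rfl)]
  rw [show List.range 1 = [0] from rfl, List.map_cons, List.map_nil, List.map_replicate]
  rw [show (([(0 : Int)] : List Int).getD 0 0) = 0 from rfl]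
  rw [pvFold_cost [List.replicate ("" :: t).length (0 : Int)] (by simp) 0]
  have hsorted : PySem.List.sorted (List.replicate (t.length + 1) (0 : Int)) (fun x => x) false
      = List.replicate (t.length + 1) 0 :=
    PySem.List.sorted_eq_self_of_pairwise _ _ (List.pairwise_replicate.mpr (by simp))
  simp [hsorted, pvD]

theorem pvA_nonneg (strings : List String) (prev : List Char)
    (hp : pvPhase1 strings [] = some prev) : 0 ≤ identical strings := by
  simp only [identical, hp]
  exact pvFoldl_le _ _
    (fun acc freq => pvFoldl_le _ _ (fun a x => le_add_of_nonneg_right (abs_nonneg _)) acc) 0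

theorem pvMain (strings : List String) (hD : ¬ D_identical strings) :
    identical strings = identical_alt strings := by
  cases strings with
  | nil => rfl
  | cons s t =>
    by_cases hs : s = ""
    · subst hs
      cases hdw : t.dropWhile (fun s => s == "") with
      | nil =>
        have hall : ∀ x ∈ t, x = "" := by
          rw [List.dropWhile_eq_nil_iff] at hdw
          intro x hx
          simpa using hdw x hx
        rw [pvA_empty t hall, pvAlt_empty t hall]
      | cons r0 r' =>
        have hr0 : r0 ≠ "" := by
          have := pvDropWhile_head _ t r0 r' hdw
          simpa using this
        have hr0l : r0.toList ≠ [] := pvStr_ne_nil r0 hr0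
        have hr0m : r0 ∈ t := (List.dropWhile_sublist _).subset (by rw [hdw]; exact List.mem_cons_self)
        have hB : identical_alt ("" :: t) = -1 :=
          pvAlt_neg _ t ⟨r0, hr0m, by
            rw [show pvCdedup ("".toList) = ([] : List Char) from rfl]
            exact pvCdedup_ne_nil r0.toList hr0l⟩
        by_cases hEq : ∀ s' ∈ r', pvCdedup s'.toList = pvCdedup r0.toList
        · exfalso
          refine hD ⟨?_, ?_, ?_⟩
          · rw [List.takeWhile_cons_of_pos (by simp)]
            simp
          · rw [List.dropWhile_cons_of_pos (by simp), hdw]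
            simp
          · intro s' hs'
            rw [List.dropWhile_cons_of_pos (by simp), hdw] at hs' ⊢
            simp only [List.head!_cons]
            rcases List.mem_cons.mp hs' with rfl | h'
            · exact ⟨hr0, rfl⟩
            · have hc := hEq s' h'
              refine ⟨?_, by rw [pvCdedup_eq_destutter, pvCdedup_eq_destutter]; exact hc⟩
              intro hnil
              apply pvCdedup_ne_nil r0.toList hr0l
              rw [← hc, hnil]
              rfl
        · have hp : pvPhase1 ("" :: t) [] = none := by
            rw [pvPhase1_cons_empty, pvPhase1_nil_cons t r0 r' hdw, if_neg hEq]
          rw [hB]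
          simp [identical, hp]
    · have hsl := pvStr_ne_nil s hs
      have hdw : (s :: t).dropWhile (fun s => s == "") = s :: t :=
        List.dropWhile_cons_of_neg (by simp [hs])
      by_cases hall : ∀ s' ∈ t, pvCdedup s'.toList = pvCdedup s.toList
      · have hp : pvPhase1 (s :: t) [] = some (pvCdedup s.toList) := by
          rw [pvPhase1_nil_cons (s :: t) s t hdw, if_pos hall]
        rw [pvA_eq_cost (s :: t) _ (by simp) hp ?hall2, pvAlt_eq_cost s t hsl hall]
        case hall2 =>
          intro x hx
          rcases List.mem_cons.mp hx with rfl | hx'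
          · exact ⟨hsl, rfl⟩
          · refine ⟨?_, hall x hx'⟩
            intro hnil
            apply pvCdedup_ne_nil s.toList hsl
            rw [← hall x hx', hnil]
            rfl
      · have hp : pvPhase1 (s :: t) [] = none := by
          rw [pvPhase1_nil_cons (s :: t) s t hdw, if_neg hall]
        simp only [not_forall] at hall
        obtain ⟨x, hx, hxe⟩ := hall
        rw [pvAlt_neg s t ⟨x, hx, hxe⟩]
        simp [identical, hp]

-- ===== VERDICT (by name: the statement is the Claim_ definition above) =====
theorem identical_spec : Claim_unchanged_identical := by
  intro strings _
  unfold Spec_identical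
  intro hD
  exact (pvMain strings hD).symm ▸ rfl

theorem identical_changed : Claim_changed_identical := by
  unfold Claim_changed_identical; decide

theorem identical_tight : Claim_exact_identical := by
  intro strings _ hD
  obtain ⟨h1, h2, h3⟩ := hD
  cases strings with
  | nil => exact absurd rfl h1
  | cons s t =>
    have hs : s = "" := by
      by_contra hs
      rw [List.takeWhile_cons_of_neg (by simp [hs])] at h1
      exact h1 rfl
    subst hs
    rw [List.dropWhile_cons_of_pos (by simp)] at h2 h3
    cases hdw : t.dropWhile (fun s => s == "") with
    | nil => exact absurd hdw h2
    | cons r0 r' =>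
      rw [hdw] at h3
      simp only [List.head!_cons] at h3
      have h3' : ∀ s' ∈ r0 :: r', s' ≠ "" ∧ pvCdedup s'.toList = pvCdedup r0.toList := by
        intro s' hs'
        refine ⟨(h3 s' hs').1, ?_⟩
        have := (h3 s' hs').2
        rwa [pvCdedup_eq_destutter, pvCdedup_eq_destutter] at this
      have hr0 := h3' r0 (List.mem_cons_self)
      have hr0l : r0.toList ≠ [] := pvStr_ne_nil r0 hr0.1
      have hr0m : r0 ∈ t := (List.dropWhile_sublist _).subset (by rw [hdw]; exact List.mem_cons_self)
      have hB : identical_alt ("" :: t) = -1 :=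
        pvAlt_neg _ t ⟨r0, hr0m, by
          rw [show pvCdedup ("".toList) = ([] : List Char) from rfl]
          exact pvCdedup_ne_nil r0.toList hr0l⟩
      have hphase : pvPhase1 ("" :: t) [] = some (pvCdedup r0.toList) := by
        rw [pvPhase1_cons_empty, pvPhase1_nil_cons t r0 r' hdw,
          if_pos (fun s' hs' => (h3' s' (List.mem_cons_of_mem _ hs')).2)]
      have hge := pvA_nonneg ("" :: t) _ hphase
      rw [hB]
      omega
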